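-- pv_equiv track=rewrite | github.com/caifengsteven/temp | email_parse.py | parse_drop_data
-- ===== SOURCE A (Python) =====
-- def parse_drop_data(data):
--     """Parse the drag and drop data to extract file paths"""
--     # The format of data varies by OS and TkinterDnD version
--     # Common formats include:
--     # - Space-separated paths
--     # - Paths with {} braces
--     # - Quoted paths
--
--     # Remove braces if present
--     if data.startswith('{') and data.endswith('}'):
--         data = data[1:-1]
--
--     # Split into separate paths
--     if '"' in data:
--         # Handle quoted paths
--         paths = []
--         current_path = ""
--         in_quotes = False
--
--         for char in data:
--             if char == '"':
--                 in_quotes = not in_quotes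
--                 if not in_quotes and current_path:
--                     paths.append(current_path)
--                     current_path = ""
--             elif in_quotes:
--                 current_path += char
--
--         if current_path:
--             paths.append(current_path)
--     else:
--         # Simple space-separated paths
--         paths = data.split(' ')
--
--     # Filter out empty paths and clean up
--     return [p.strip() for p in paths if p.strip()]
-- ===== SOURCE B (Python) =====
-- def parse_drop_data(data):
--     """Parse the drag and drop data to extract file paths"""
--     # Remove braces if present
--     if data.startswith('{') and data.endswith('}'):
--         data = data[1:-1]
--
--     if '"' in data:
--         # Quoted paths: the segments at odd indices of split('"') are exactly
--         # the contents between quote pairs (plus a trailing unterminated run).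
--         paths = data.split('"')[1::2]
--     else:
--         # Simple space-separated paths
--         paths = data.split(' ')
--
--     return [p.strip() for p in paths if p.strip()]
-- ===== Notes on version B (the rewrite author's own statement) =====
-- stated objective: simpler
-- what changed: The character-by-character quote state machine (in_quotes flag, current_path accumulator, conditional appends) is replaced by slicing the odd-index segments out of the quote-split of the data; brace stripping, the space-split branch and the final strip-filter are unchanged.
import Mathlib
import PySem

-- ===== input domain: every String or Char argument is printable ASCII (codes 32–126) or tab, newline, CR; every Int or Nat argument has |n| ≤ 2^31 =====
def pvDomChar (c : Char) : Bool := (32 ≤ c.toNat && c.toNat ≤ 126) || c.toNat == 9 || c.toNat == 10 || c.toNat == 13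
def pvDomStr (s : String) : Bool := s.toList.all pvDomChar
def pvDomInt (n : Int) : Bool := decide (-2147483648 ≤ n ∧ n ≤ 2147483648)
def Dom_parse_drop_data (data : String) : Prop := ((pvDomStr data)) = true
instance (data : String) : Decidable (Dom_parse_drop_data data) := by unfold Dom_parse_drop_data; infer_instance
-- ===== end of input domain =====

-- B replaces A's character-by-character quote state machine with split('"')[1::2]; simpler, same cost.

-- ===== PORT A =====
-- one step of the for-loop over the characters (state: paths, current_path, in_quotes)
def pdStep (acc : List (List Char) × List Char × Bool) (c : Char) :
    List (List Char) × List Char × Bool :=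
  match acc with
  | (paths, cur, inq) =>
    if c = '"' then
      let inq' := !inq
      if !inq' && !cur.isEmpty then (paths ++ [cur], [], inq')
      else (paths, cur, inq')
    else if inq then (paths, cur ++ [c], inq)
    else (paths, cur, inq)

def parse_drop_data (data : String) : List String :=
  let d : List Char :=
    if PySem.Str.startswith data "{" && PySem.Str.endswith data "}" then
      PySem.List.slice data.toList (some 1) (some (-1))
    else data.toList
  let paths : List (List Char) :=
    if PySem.Chars.isIn ['"'] d then
      match d.foldl pdStep ([], [], false) with
      | (ps, cur, _) => if !cur.isEmpty then ps ++ [cur] else ps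
    else PySem.Chars.splitOn d [' ']
  (paths.filter (fun p => !(PySem.Chars.strip p).isEmpty)).map
    (fun p => String.ofList (PySem.Chars.strip p))

-- ===== PORT B =====
def parse_drop_data_alt (data : String) : List String :=
  let d : List Char :=
    if PySem.Str.startswith data "{" && PySem.Str.endswith data "}" then
      PySem.List.slice data.toList (some 1) (some (-1))
    else data.toList
  let paths : List (List Char) :=
    if PySem.Chars.isIn ['"'] d then
      (PySem.List.slice? (PySem.Chars.splitOn d ['"']) (some 1) none 2).getD []
    else PySem.Chars.splitOn d [' ']
  (paths.filter (fun p => !(PySem.Chars.strip p).isEmpty)).map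
    (fun p => String.ofList (PySem.Chars.strip p))

-- ===== PRECONDITION & SPEC =====
def Spec_parse_drop_data (data : String) (out : List String) : Prop := out = parse_drop_data_alt data
instance (data : String) (out : List String) : Decidable (Spec_parse_drop_data data out) := by unfold Spec_parse_drop_data; infer_instance

-- ===== CLAIM (what is proved, stated in full; the proofs are below) =====
def Claim_equal_parse_drop_data : Prop := ∀ (data : String), Dom_parse_drop_data data → Spec_parse_drop_data data (parse_drop_data data)

-- ===== LEMMAS AND PROOFS =====

-- elements at even / odd indices
mutual
def pvEvenIdx {α : Type} : List α → List α
  | [] => []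
  | a :: t => a :: pvOddIdx t
def pvOddIdx {α : Type} : List α → List α
  | [] => []
  | _ :: t => pvEvenIdx t
end

-- simple split on '"'
def pvSplitQ : List Char → List (List Char)
  | [] => [[]]
  | c :: t =>
    if c = '"' then [] :: pvSplitQ t
    else
      match pvSplitQ t with
      | [] => [[c]]
      | s :: r => (c :: s) :: r

def pvHeadCons (pre : List Char) : List (List Char) → List (List Char)
  | [] => [pre]
  | s :: r => (pre ++ s) :: r

lemma pvSplitQ_ne_nil (l : List Char) : pvSplitQ l ≠ [] := by
  cases l with
  | nil => simp [pvSplitQ]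
  | cons c t =>
    simp only [pvSplitQ]
    split
    · simp
    · split <;> simp

lemma pvGo_eq (fuel : Nat) : ∀ (l cur : List Char) (acc : List (List Char)),
    l.length ≤ fuel →
    PySem.Chars.splitOn.go ['"'] fuel l cur acc
      = acc.reverse ++ pvHeadCons cur.reverse (pvSplitQ l) := by
  induction fuel with
  | zero =>
    intro l cur acc h
    have : l = [] := by cases l <;> simp_all
    subst this
    simp [PySem.Chars.splitOn.go, pvSplitQ, pvHeadCons]
  | succ n ih =>
    intro l cur acc h
    cases l with
    | nil => simp [PySem.Chars.splitOn.go, pvSplitQ, pvHeadCons]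
    | cons c rest =>
      by_cases hc : c = '"'
      · subst hc
        have hpre : List.isPrefixOf ['"'] ('"' :: rest) = true := by
          simp [List.isPrefixOf]
        rw [PySem.Chars.splitOn.go]
        simp only [hpre, if_true, List.length_cons, List.length_nil, List.drop_succ_cons,
          List.drop_zero]
        rw [ih rest [] (cur.reverse :: acc) (by simp only [List.length_cons] at h; omega)]
        simp only [pvSplitQ, if_pos rfl]
        cases hq : pvSplitQ rest with
        | nil => exact absurd hq (pvSplitQ_ne_nil rest)
        | cons s r => simp [pvHeadCons]
      · have hpre : List.isPrefixOf ['"'] (c :: rest) = false := by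
          simp [List.isPrefixOf]
          exact fun h => absurd h.symm hc
        rw [PySem.Chars.splitOn.go]
        simp only [hpre, Bool.false_eq_true, if_false]
        rw [ih rest (c :: cur) acc (by simpa using Nat.le_of_succ_le_succ h)]
        simp only [pvSplitQ, if_neg hc]
        cases hq : pvSplitQ rest with
        | nil => exact absurd hq (pvSplitQ_ne_nil rest)
        | cons s r => simp [pvHeadCons]

lemma pvSplitOn_eq (l : List Char) :
    PySem.Chars.splitOn l ['"'] = pvSplitQ l := by
  have h := pvGo_eq (l.length + 1) l [] [] (by omega)
  simp only [PySem.Chars.splitOn]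
  rw [h]
  cases hq : pvSplitQ l with
  | nil => exact absurd hq (pvSplitQ_ne_nil l)
  | cons s r => simp [pvHeadCons]

mutual
lemma pvEvenIdx_length {α : Type} (l : List α) : (pvEvenIdx l).length = (l.length + 1) / 2 := by
  cases l with
  | nil => simp [pvEvenIdx]
  | cons a t =>
    simp only [pvEvenIdx, List.length_cons, pvOddIdx_length t]
    omega
lemma pvOddIdx_length {α : Type} (l : List α) : (pvOddIdx l).length = l.length / 2 := by
  cases l with
  | nil => simp [pvOddIdx]
  | cons a t =>
    simp only [pvOddIdx, List.length_cons, pvEvenIdx_length t]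
end

mutual
lemma pvEvenIdx_getD {α : Type} (l : List α) (k : Nat) (d : α) :
    (pvEvenIdx l).getD k d = l.getD (2 * k) d := by
  cases l with
  | nil => simp [pvEvenIdx]
  | cons a t =>
    cases k with
    | zero => simp [pvEvenIdx]
    | succ m =>
      simp only [pvEvenIdx, List.getD_cons_succ, pvOddIdx_getD t m d]
      have : 2 * (m + 1) = (2 * m + 1) + 1 := by omega
      rw [this, List.getD_cons_succ]
lemma pvOddIdx_getD {α : Type} (l : List α) (k : Nat) (d : α) :
    (pvOddIdx l).getD k d = l.getD (2 * k + 1) d := by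
  cases l with
  | nil => simp [pvOddIdx]
  | cons a t =>
    simp only [pvOddIdx, pvEvenIdx_getD t k d, List.getD_cons_succ]
end

-- slice [1::2] is exactly the odd-index elements
lemma pvSlice?_oddIdx {α : Type} (xs : List α) :
    PySem.List.slice? xs (some 1) none 2 = some (pvOddIdx xs) := by
  have h2 : (2 : Int) ≠ 0 := by norm_num
  simp only [PySem.List.slice?, h2, if_false, PySem.List.sliceIndices]
  norm_num
  cases xs with
  | nil => simp [pvOddIdx]
  | cons a tl =>
    have hcount : (if 1 < (a :: tl).length then ((((a :: tl).length : Int) - min 1 ((a :: tl).length : Int) + 2 - 1) / 2).toNat else 0) = (a :: tl).length / 2 := by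
      split <;> omega
    rw [hcount]
    rw [List.filterMap_congr (g := fun k => some ((a :: tl).getD (2 * k + 1) a)) ?_]
    · rw [show (fun k => some ((a :: tl).getD (2 * k + 1) a)) = some ∘ (fun k => (a :: tl).getD (2 * k + 1) a) from rfl,
        List.filterMap_eq_map]
      apply List.ext_getElem
      · simp [pvOddIdx_length]
      · intro i h1 h2'
        simp only [List.getElem_map, List.getElem_range]
        rw [← List.getD_eq_getElem (pvOddIdx (a :: tl)) a h2', pvOddIdx_getD]
    · intro k hk
      simp only [List.mem_range] at hk
      have hidx : (min 1 ((a :: tl).length : Int) + 2 * (k : Int)).toNat = 2 * k + 1 := by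
        simp only [List.length_cons] at *; omega
      rw [hidx]
      have hlt : 2 * k + 1 < (a :: tl).length := by simp only [List.length_cons] at *; omega
      rw [List.getElem?_eq_getElem hlt]
      exact congrArg some (List.getD_eq_getElem (a :: tl) a hlt).symm

-- the state machine, written as recursion on the characters
mutual
def pvRes0 (l : List Char) (cur : List Char) : List (List Char) :=
  match l with
  | [] => if cur.isEmpty then [] else [cur]
  | c :: t => if c = '"' then pvRes1 t cur else pvRes0 t cur
def pvRes1 (l : List Char) (cur : List Char) : List (List Char) :=
  match l with
  | [] => if cur.isEmpty then [] else [cur]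
  | c :: t =>
    if c = '"' then (if cur.isEmpty then [] else [cur]) ++ pvRes0 t []
    else pvRes1 t (cur ++ [c])
end

def pvFinish (st : List (List Char) × List Char × Bool) : List (List Char) :=
  if !st.2.1.isEmpty then st.1 ++ [st.2.1] else st.1

lemma pvFold_res (l : List Char) : ∀ (ps : List (List Char)) (cur : List Char) (inq : Bool),
    pvFinish (l.foldl pdStep (ps, cur, inq))
      = ps ++ (if inq then pvRes1 l cur else pvRes0 l cur) := by
  induction l with
  | nil =>
    intro ps cur inq
    cases inq <;> simp [pvFinish, pvRes0, pvRes1] <;> cases cur <;> simp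
  | cons c t ih =>
    intro ps cur inq
    simp only [List.foldl_cons]
    by_cases hc : c = '"'
    · subst hc
      cases inq with
      | false =>
        simp only [pdStep, if_pos rfl, Bool.not_false, Bool.not_true, Bool.false_and,
          Bool.false_eq_true, if_false, ih]
        simp [pvRes0]
      | true =>
        by_cases hcur : cur.isEmpty
        · have hc0 : cur = [] := by simpa [List.isEmpty_iff] using hcur
          subst hc0
          simp only [pdStep, Bool.not_true, Bool.not_false, Bool.true_and, List.isEmpty_nil,
            Bool.not_true, Bool.false_eq_true, if_false, if_pos rfl, ih]
          simp [pvRes1]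
        · simp only [pdStep, if_pos rfl, Bool.not_true, Bool.not_false, Bool.true_and,
            Bool.not_eq_eq_eq_not] at *
          rw [if_pos (by simp [hcur])]
          rw [ih]
          simp [pvRes1, hcur]
    · cases inq with
      | false =>
        simp only [pdStep, if_neg hc, Bool.false_eq_true, if_false, ih]
        simp [pvRes0, hc]
      | true =>
        simp only [pdStep, if_neg hc, if_pos rfl, ih]
        simp [pvRes1, hc]

-- the state machine emits exactly the nonempty odd-index segments of the quote-split
mutual
lemma pvRes0_splitQ (l : List Char) :
    pvRes0 l [] = (pvOddIdx (pvSplitQ l)).filter (fun p => !p.isEmpty) := by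
  cases l with
  | nil => simp [pvRes0, pvSplitQ, pvOddIdx, pvEvenIdx]
  | cons c t =>
    by_cases hc : c = '"'
    · subst hc
      simp only [pvRes0, if_pos rfl, pvSplitQ, pvRes1_splitQ t []]
      cases hq : pvSplitQ t with
      | nil => exact absurd hq (pvSplitQ_ne_nil t)
      | cons s r => simp [pvOddIdx, pvEvenIdx, pvHeadCons]
    · simp only [pvRes0, if_neg hc, pvSplitQ, pvRes0_splitQ t]
      cases hq : pvSplitQ t with
      | nil => exact absurd hq (pvSplitQ_ne_nil t)
      | cons s r => simp [pvOddIdx]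
lemma pvRes1_splitQ (l : List Char) (cur : List Char) :
    pvRes1 l cur
      = ((cur ++ (pvSplitQ l).headI) :: pvOddIdx ((pvSplitQ l).tail)).filter
          (fun p => !p.isEmpty) := by
  cases l with
  | nil => cases cur <;> simp [pvRes1, pvSplitQ, pvOddIdx, List.filter]
  | cons c t =>
    by_cases hc : c = '"'
    · subst hc
      simp only [pvRes1, if_pos rfl, pvSplitQ, pvRes0_splitQ t]
      cases hq : pvSplitQ t with
      | nil => exact absurd hq (pvSplitQ_ne_nil t)
      | cons s r =>
        cases cur <;> simp [List.filter, pvOddIdx]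
    · simp only [pvRes1, if_neg hc, pvSplitQ, pvRes1_splitQ t (cur ++ [c])]
      cases hq : pvSplitQ t with
      | nil => exact absurd hq (pvSplitQ_ne_nil t)
      | cons s r => simp

end

-- filtering out the empty segments first does not change the strip-filter
lemma pvFilter_filter (paths : List (List Char)) :
    ((paths.filter (fun p => !p.isEmpty)).filter (fun p => !(PySem.Chars.strip p).isEmpty))
      = paths.filter (fun p => !(PySem.Chars.strip p).isEmpty) := by
  rw [List.filter_filter]
  apply List.filter_congr
  intro p _
  cases hp : p.isEmpty
  · simp
  · have : p = [] := by simpa [List.isEmpty_iff] using hp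
    subst this
    simp [PySem.Chars.strip, PySem.Chars.lstrip, PySem.Chars.rstrip]

-- ===== VERDICT (by name: the statement is the Claim_ definition above) =====
theorem parse_drop_data_spec : Claim_equal_parse_drop_data := by
  intro data _
  unfold Spec_parse_drop_data
  simp only [parse_drop_data, parse_drop_data_alt]
  generalize (if PySem.Str.startswith data "{" && PySem.Str.endswith data "}" then
      PySem.List.slice data.toList (some 1) (some (-1)) else data.toList) = d
  by_cases hq : PySem.Chars.isIn ['"'] d
  · rw [if_pos hq, if_pos hq]
    congr 1
    have hA := pvFold_res d [] [] false
    simp only [pvFinish, List.nil_append, Bool.if_false_right] at hA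
    rw [hA, pvRes0_splitQ, pvSplitOn_eq, pvSlice?_oddIdx]
    exact pvFilter_filter _
  · rw [if_neg hq, if_neg hq]
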